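-- pv_equiv track=rewrite | github.com/whitepaper2/algoDiary | algo-improve/0x23-sticks.py | minStickLength
-- ===== SOURCE A (Python) =====
-- from typing import List
--
-- def minStickLength(sticks: List[int]) -> int:
--     n = len(sticks)
--     total = sum(sticks)
--     maxLen = max(sticks)
--     sticks.sort(reverse=True)
--     res = 0
--     isVisited = [0] * n
--
--     def dfs(idx, cab, last, cnt, curlen):
--         """
--         @idx:拼接第 idx 根木棒，
--         @cab:当前已拼接的木棒长度
--         @last:最近使用过的木棒
--         @cnt\curlen:可选的原始木棒长度和个数
--         @return: T/F
--         """
--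
--         if idx >= cnt:
--             return True
--         if cab == curlen:
--             return dfs(idx + 1, 0, 0, cnt, curlen)
--         fail = 0
--         for i in range(last, n):
--             # 不再搜索上次相同的失败匹配
--             if not isVisited[
--                     i] and cab + sticks[i] <= curlen and fail != sticks[i]:
--                 isVisited[i] = 1
--                 if dfs(idx, cab + sticks[i], i + 1, cnt, curlen):
--                     return True
--                 fail = sticks[i]
--                 isVisited[i] = 0
--                 if cab == 0 or cab + sticks[i] == curlen:
--                     return False
--         return False
--
--     for curlen in range(maxLen, total + 1):
--         if total % curlen:
--             continue
--         # 原始木棒长度curlen, 有curcnt个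
--         curcnt = total // curlen
--         if dfs(1, 0, 0, curcnt, curlen):
--             res = curlen
--             break
--     return res
-- ===== SOURCE B (Python) =====
-- from typing import List
--
-- def minStickLength(sticks: List[int]) -> int:
--     # B: single recursive filler over (need, rem, skipped, avail) with the pieces
--     # held as two plain lists and the current stick tracked by its remaining
--     # capacity; candidate lengths are the divisors of total, collected first.
--     total = sum(sticks)
--     maxLen = max(sticks)
--     sticks.sort(reverse=True)
--
--     def fill(need, rem, fail, skipped, avail, curlen):
--         if need <= 0:
--             return True
--         if rem == 0:
--             return fill(need - 1, curlen, 0, [], skipped[::-1] + avail, curlen)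
--         if not avail:
--             return False
--         x, rest = avail[0], avail[1:]
--         if x <= rem and fail != x:
--             if fill(need, rem - x, 0, skipped, rest, curlen):
--                 return True
--             if rem == curlen or x == rem:
--                 return False
--             return fill(need, rem, x, [x] + skipped, rest, curlen)
--         return fill(need, rem, fail, [x] + skipped, rest, curlen)
--
--     candidates = (d for d in range(maxLen, total + 1) if total % d == 0)
--     for d in candidates:
--         if fill(total // d - 1, d, 0, [], sticks, d):
--             return d
--     return 0
-- ===== Notes on version B (the rewrite author's own statement) =====
-- stated objective: alternative
-- what changed: A's mutual stick-building dfs over a fixed sorted array with a visited bitmap and index bounds is replaced by one recursive filler over plain piece lists (skipped/avail) that tracks the current stick by its remaining capacity, and A's interleaved divisor loop is replaced by collecting the divisor candidates first and taking the first feasible one; the search tree and pruning rules are the same.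
-- outside the precondition, e.g. on minStickLength([]): A raises ValueError, B raises ValueError; on minStickLength([0, 0]): A raises ZeroDivisionError, B raises ZeroDivisionError
import Mathlib
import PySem

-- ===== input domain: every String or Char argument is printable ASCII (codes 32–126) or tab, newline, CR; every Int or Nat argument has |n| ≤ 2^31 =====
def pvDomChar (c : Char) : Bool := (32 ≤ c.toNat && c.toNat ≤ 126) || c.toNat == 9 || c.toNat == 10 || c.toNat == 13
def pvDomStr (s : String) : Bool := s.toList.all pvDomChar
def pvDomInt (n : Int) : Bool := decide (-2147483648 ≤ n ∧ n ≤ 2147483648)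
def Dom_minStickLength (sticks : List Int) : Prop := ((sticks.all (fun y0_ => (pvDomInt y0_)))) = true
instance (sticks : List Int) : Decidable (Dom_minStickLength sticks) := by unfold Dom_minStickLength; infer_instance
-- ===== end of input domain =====

-- B replaces A's mutual stick-building dfs over a visited bitmap (index `last`, bound `n`)
-- by ONE recursive filler over plain piece lists (skipped / avail) tracking the current
-- stick by its remaining capacity, and the outer loop by a divisor-list-then-first-feasible
-- scan; objective: alternative (same exact search tree, different decomposition, not faster).
-- Both A and B sort the argument list in place (sticks.sort(reverse=True)); the equivalence
-- proved here is about the RETURN value (the mutation is identical in A and B).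

-- ===== PORT A =====
mutual
-- A's inner `def dfs(idx, cab, last, cnt, curlen)` (closure over sticks-sorted, n, isVisited)
def dfsA (s : List Int) (curlen cnt idx cab : Int) (last : Nat) (vis : List Bool) : Bool :=
  if cnt ≤ idx then true
  else if cab = curlen then dfsA s curlen cnt (idx+1) 0 0 vis
  else loopA s curlen cnt idx cab last 0 vis
termination_by ((cnt - idx).toNat, 2 * (s.length - last) + 3)
decreasing_by
  · apply Prod.Lex.left; omega
  · apply Prod.Lex.right; omega

-- A's `for i in range(last, n)` with its `fail` accumulator
def loopA (s : List Int) (curlen cnt idx cab : Int) (i : Nat) (fail : Int) (vis : List Bool) : Bool :=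
  if h : i < s.length then
    if vis.getD i false = false ∧ cab + s[i] ≤ curlen ∧ fail ≠ s[i] then
      if dfsA s curlen cnt idx (cab + s[i]) (i+1) (vis.set i true) then true
      else if cab = 0 ∨ cab + s[i] = curlen then false
      else loopA s curlen cnt idx cab (i+1) s[i] vis
    else loopA s curlen cnt idx cab (i+1) fail vis
  else false
termination_by ((cnt - idx).toNat, 2 * (s.length - i) + 2)
decreasing_by
  · apply Prod.Lex.right; omega
  · apply Prod.Lex.right; omega
  · apply Prod.Lex.right; omega
end

-- A's `for curlen in range(maxLen, total+1): … break` (fuel = length of the range)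
def outerA (s : List Int) (total : Int) : Nat → Int → Int
  | 0, _ => 0
  | fuel+1, curlen =>
    if PySem.Int.mod total curlen ≠ 0 then outerA s total fuel (curlen + 1)
    else if dfsA s curlen (PySem.Int.floordiv total curlen) 1 0 0 (List.replicate s.length false) then curlen
    else outerA s total fuel (curlen + 1)

def minStickLength (sticks : List Int) : Int :=
  match PySem.List.max? sticks (fun x => x) with
  | none => 0  -- unreachable under Pre_: max([]) raises ValueError in Python
  | some maxLen =>
    let total := sticks.sum
    let s := PySem.List.sorted sticks (fun x => x) true
    outerA s total (total + 1 - maxLen).toNat maxLen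

-- ===== PORT B =====
-- B's single `def fill(need, rem, fail, skipped, avail, curlen)`
def fillB (curlen need rem fail : Int) (skipped avail : List Int) : Bool :=
  if need ≤ 0 then true
  else if rem = 0 then fillB curlen (need - 1) curlen 0 [] (skipped.reverse ++ avail)
  else match avail with
    | [] => false
    | x :: rest =>
      if x ≤ rem ∧ fail ≠ x then
        if fillB curlen need (rem - x) 0 skipped rest then true
        else if rem = curlen ∨ x = rem then false
        else fillB curlen need rem x (x :: skipped) rest
      else fillB curlen need rem fail (x :: skipped) rest
termination_by (need.toNat, avail.length)
decreasing_by
  · apply Prod.Lex.left; omega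
  · apply Prod.Lex.right; simp
  · apply Prod.Lex.right; simp
  · apply Prod.Lex.right; simp

def minStickLength_alt (sticks : List Int) : Int :=
  match PySem.List.max? sticks (fun x => x) with
  | none => 0  -- unreachable under Pre_: max([]) raises ValueError in Python
  | some maxLen =>
    let total := sticks.sum
    let s := PySem.List.sorted sticks (fun x => x) true
    let candidates := (PySem.List.pyRange maxLen (total + 1) 1).filter
      (fun d => PySem.Int.mod total d == 0)
    match candidates.find?
        (fun d => fillB d (PySem.Int.floordiv total d - 1) d 0 [] s) with
    | some d => d
    | none => 0

-- ===== PRECONDITION & SPEC =====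
-- Pre_ excludes exactly the inputs on which Python A raises: the empty list (max([]) raises
-- ValueError) and non-empty all-zero lists (curlen = 0 is reached and total % 0 raises
-- ZeroDivisionError). On every other input A returns normally.
def Pre_minStickLength (sticks : List Int) : Prop :=
  sticks ≠ [] ∧ ¬ (∀ x ∈ sticks, x = 0)
instance (sticks : List Int) : Decidable (Pre_minStickLength sticks) := by
  unfold Pre_minStickLength; infer_instance
def pvWitness_minStickLength : List Int := [2, 1, 1]

def Spec_minStickLength (sticks : List Int) (out : Int) : Prop := out = minStickLength_alt sticks
instance (sticks : List Int) (out : Int) : Decidable (Spec_minStickLength sticks out) := by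
  unfold Spec_minStickLength; infer_instance

-- ===== CLAIM (what is proved, stated in full; the proofs are below) =====
def Claim_equal_minStickLength : Prop := ∀ (sticks : List Int), Dom_minStickLength sticks → Pre_minStickLength sticks → Spec_minStickLength sticks (minStickLength sticks)

-- ===== LEMMAS AND PROOFS =====

-- the unvisited elements of s, in order (relates A's visited bitmap to B's piece lists)
def keep : List Int → List Bool → List Int
  | [], _ => []
  | _ :: _, [] => []
  | x :: xs, b :: bs => if b then keep xs bs else x :: keep xs bs

theorem keep_replicate (s : List Int) : keep s (List.replicate s.length false) = s := by
  induction s with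
  | nil => rfl
  | cons x xs ih =>
    simp only [List.length_cons, List.replicate_succ, keep, if_neg Bool.false_ne_true, ih]

theorem keep_append (as cs : List Int) (bs ds : List Bool) (h : as.length = bs.length) :
    keep (as ++ cs) (bs ++ ds) = keep as bs ++ keep cs ds := by
  induction as generalizing bs with
  | nil => cases bs with
    | nil => rfl
    | cons b t => simp at h
  | cons x xs ih =>
    cases bs with
    | nil => simp at h
    | cons b t =>
      simp only [List.cons_append, keep]
      rw [ih t (by simpa using h)]
      split <;> simp

theorem keep_take_append_drop (s : List Int) (vis : List Bool) (i : Nat) (h : vis.length = s.length) :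
    keep (s.take i) (vis.take i) ++ keep (s.drop i) (vis.drop i) = keep s vis := by
  rw [← keep_append _ _ _ _ (by simp [h])]
  simp

theorem keep_drop_succ (s : List Int) (vis : List Bool) (i : Nat) (hi : i < s.length)
    (hv : i < vis.length) :
    keep (s.drop i) (vis.drop i)
      = if vis[i] then keep (s.drop (i+1)) (vis.drop (i+1))
        else s[i] :: keep (s.drop (i+1)) (vis.drop (i+1)) := by
  rw [List.drop_eq_getElem_cons hi, List.drop_eq_getElem_cons hv]
  rfl

theorem keep_take_succ (s : List Int) (vis : List Bool) (i : Nat) (hi : i < s.length)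
    (hv : i < vis.length) :
    keep (s.take (i+1)) (vis.take (i+1))
      = keep (s.take i) (vis.take i) ++ (if vis[i] then [] else [s[i]]) := by
  rw [List.take_add_one, List.take_add_one]
  simp only [List.getElem?_eq_getElem hi, List.getElem?_eq_getElem hv, Option.toList_some]
  rw [keep_append _ _ _ _ (by simp [Nat.le_of_lt hi, Nat.le_of_lt hv])]
  by_cases hb : vis[i] <;> simp [hb, keep]

theorem set_take_self (l : List Bool) (i : Nat) : (l.set i true).take i = l.take i := by
  rw [List.take_set]
  exact List.set_eq_of_length_le (by simp)

theorem set_drop_self (l : List Bool) (i : Nat) : (l.set i true).drop (i+1) = l.drop (i+1) := by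
  simp [List.drop_set]

theorem fillB_nil (curlen need rem fail : Int) (skipped : List Int)
    (h1 : ¬ need ≤ 0) (h2 : ¬ rem = 0) :
    fillB curlen need rem fail skipped [] = false := by
  rw [fillB.eq_def, if_neg h1, if_neg h2]

theorem fillB_cons (curlen need rem fail x : Int) (skipped rest : List Int)
    (h1 : ¬ need ≤ 0) (h2 : ¬ rem = 0) :
    fillB curlen need rem fail skipped (x :: rest)
      = if x ≤ rem ∧ fail ≠ x then
          if fillB curlen need (rem - x) 0 skipped rest then true
          else if rem = curlen ∨ x = rem then false
          else fillB curlen need rem x (x :: skipped) rest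
        else fillB curlen need rem fail (x :: skipped) rest := by
  rw [fillB.eq_def, if_neg h1, if_neg h2]

theorem keep_main (s : List Int) (curlen cnt : Int) :
    ∀ (idx cab : Int) (last : Nat) (vis : List Bool),
      vis.length = s.length → last ≤ s.length →
        dfsA s curlen cnt idx cab last vis
          = fillB curlen (cnt - idx) (curlen - cab) 0
              ((keep (s.take last) (vis.take last)).reverse)
              (keep (s.drop last) (vis.drop last)) := by
  apply dfsA.induct s curlen cnt
    (motive1 := fun idx cab last vis =>
      vis.length = s.length → last ≤ s.length →
        dfsA s curlen cnt idx cab last vis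
          = fillB curlen (cnt - idx) (curlen - cab) 0
              ((keep (s.take last) (vis.take last)).reverse)
              (keep (s.drop last) (vis.drop last)))
    (motive2 := fun idx cab i fail vis =>
      vis.length = s.length → i ≤ s.length → idx < cnt → cab ≠ curlen →
        loopA s curlen cnt idx cab i fail vis
          = fillB curlen (cnt - idx) (curlen - cab) fail
              ((keep (s.take i) (vis.take i)).reverse)
              (keep (s.drop i) (vis.drop i)))
  -- case 1: idx >= cnt, both return True
  · intro idx cab last vis h _ _
    rw [dfsA, fillB.eq_def]
    simp [h, show cnt - idx ≤ 0 by omega]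
  -- case 2: cab == curlen: A moves to stick idx+1, B refills a stick from all unused pieces
  · intro idx last vis h ih hl hlast
    rw [dfsA, fillB.eq_def]
    simp only [if_neg h]
    rw [if_neg (show ¬ cnt - idx ≤ 0 by omega), if_pos (show curlen - curlen = 0 by ring)]
    rw [ih hl (Nat.zero_le _)]
    have e1 : cnt - (idx + 1) = cnt - idx - 1 := by ring
    have e2 : (curlen - 0) = curlen := by ring
    rw [e1, e2]
    simp only [List.take_zero, List.drop_zero, List.reverse_reverse,
      keep_take_append_drop s vis last hl]
    rfl
  -- case 3: descend into the scanning loop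
  · intro idx cab last vis h hne ih hl hlast
    rw [dfsA]
    simp only [if_neg h, if_neg hne]
    exact ih hl hlast (by omega) hne
  -- case 4: candidate piece accepted and the child search succeeds
  · intro idx cab i fail vis h hcond hchild ih hl hile hidx hcc
    have hv : i < vis.length := hl ▸ h
    have hvis : vis[i] = false := by
      have := hcond.1; rwa [List.getD_eq_getElem vis false hv] at this
    rw [loopA]
    simp only [dif_pos h, if_pos hcond, if_pos hchild]
    rw [keep_drop_succ s vis i h hv, hvis, if_neg Bool.false_ne_true]
    rw [fillB_cons _ _ _ _ _ _ _ (show ¬ cnt - idx ≤ 0 by omega)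
      (show ¬ curlen - cab = 0 by omega)]
    rw [if_pos (show s[i] ≤ curlen - cab ∧ fail ≠ s[i] from ⟨by omega, hcond.2.2⟩)]
    have hc := ih (by simpa using hl) (by omega)
    rw [keep_take_succ s (vis.set i true) i h (by simpa using hv),
        List.getElem_set_self (by simpa using hv), set_take_self, set_drop_self] at hc
    simp only [if_true, List.append_nil] at hc
    rw [show curlen - cab - s[i] = curlen - (cab + s[i]) by ring, ← hc, hchild]
    simp
  -- case 5: child fails and the cab==0 / exact-fill pruning fires: both give False
  · intro idx cab i fail vis h hcond hchild hprune ih hl hile hidx hcc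
    have hv : i < vis.length := hl ▸ h
    have hvis : vis[i] = false := by
      have := hcond.1; rwa [List.getD_eq_getElem vis false hv] at this
    rw [loopA]
    simp only [dif_pos h, if_pos hcond]
    rw [if_neg hchild, if_pos hprune]
    rw [keep_drop_succ s vis i h hv, hvis, if_neg Bool.false_ne_true]
    rw [fillB_cons _ _ _ _ _ _ _ (show ¬ cnt - idx ≤ 0 by omega)
      (show ¬ curlen - cab = 0 by omega)]
    rw [if_pos (show s[i] ≤ curlen - cab ∧ fail ≠ s[i] from ⟨by omega, hcond.2.2⟩)]
    have hc := ih (by simpa using hl) (by omega)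
    rw [keep_take_succ s (vis.set i true) i h (by simpa using hv),
        List.getElem_set_self (by simpa using hv), set_take_self, set_drop_self] at hc
    simp only [if_true, List.append_nil] at hc
    rw [show curlen - cab - s[i] = curlen - (cab + s[i]) by ring, ← hc]
    simp only [Bool.not_eq_true] at hchild
    rw [hchild, if_neg (by simp)]
    rw [if_pos (show curlen - cab = curlen ∨ s[i] = curlen - cab by
      rcases hprune with h0 | h0
      · left; omega
      · right; omega)]
  -- case 6: child fails, no pruning: both continue with fail = piece just tried
  · intro idx cab i fail vis h hcond hchild hprune ih1 ih2 hl hile hidx hcc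
    have hv : i < vis.length := hl ▸ h
    have hvis : vis[i] = false := by
      have := hcond.1; rwa [List.getD_eq_getElem vis false hv] at this
    rw [loopA]
    simp only [dif_pos h, if_pos hcond]
    rw [if_neg hchild, if_neg hprune]
    rw [keep_drop_succ s vis i h hv, hvis, if_neg Bool.false_ne_true]
    rw [fillB_cons _ _ _ _ _ _ _ (show ¬ cnt - idx ≤ 0 by omega)
      (show ¬ curlen - cab = 0 by omega)]
    rw [if_pos (show s[i] ≤ curlen - cab ∧ fail ≠ s[i] from ⟨by omega, hcond.2.2⟩)]
    have hc := ih1 (by simpa using hl) (by omega)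
    rw [keep_take_succ s (vis.set i true) i h (by simpa using hv),
        List.getElem_set_self (by simpa using hv), set_take_self, set_drop_self] at hc
    simp only [if_true, List.append_nil] at hc
    rw [show curlen - cab - s[i] = curlen - (cab + s[i]) by ring, ← hc]
    simp only [Bool.not_eq_true] at hchild
    rw [hchild, if_neg (by simp)]
    rw [if_neg (show ¬ (curlen - cab = curlen ∨ s[i] = curlen - cab) by
      rintro (h0 | h0)
      · exact hprune (Or.inl (by omega))
      · exact hprune (Or.inr (by omega)))]
    rw [ih2 hl (by omega) hidx hcc, keep_take_succ s vis i h hv, hvis]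
    simp
  -- case 7: piece skipped (visited, too long, or equal to the last failure)
  · intro idx cab i fail vis h hcond ih hl hile hidx hcc
    have hv : i < vis.length := hl ▸ h
    rw [loopA]
    simp only [dif_pos h, if_neg hcond]
    rw [ih hl (by omega) hidx hcc]
    by_cases hvis : vis[i] = true
    · rw [keep_drop_succ s vis i h hv, if_pos hvis,
          keep_take_succ s vis i h hv, if_pos hvis, List.append_nil]
    · simp only [Bool.not_eq_true] at hvis
      have hnc : ¬ (s[i] ≤ curlen - cab ∧ fail ≠ s[i]) := by
        intro hc
        exact hcond ⟨by rw [List.getD_eq_getElem vis false hv, hvis], by omega, hc.2⟩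
      rw [keep_drop_succ s vis i h hv, hvis, if_neg Bool.false_ne_true]
      rw [fillB_cons _ _ _ _ _ _ _ (show ¬ cnt - idx ≤ 0 by omega)
        (show ¬ curlen - cab = 0 by omega), if_neg hnc,
        keep_take_succ s vis i h hv, hvis]
      simp
  -- case 8: scan exhausted: both give False
  · intro idx cab i fail vis h hl hile hidx hcc
    rw [loopA]
    simp only [dif_neg h]
    have hd : s.drop i = [] := List.drop_eq_nil_of_le (by omega)
    rw [hd, show keep [] (vis.drop i) = [] from rfl,
      fillB_nil _ _ _ _ _ (show ¬ cnt - idx ≤ 0 by omega)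
        (show ¬ curlen - cab = 0 by omega)]

theorem outer_eq (s : List Int) (total : Int) :
    ∀ (fuel : Nat) (curlen : Int), fuel = (total + 1 - curlen).toNat →
      outerA s total fuel curlen
        = (((PySem.List.pyRange curlen (total + 1) 1).filter
              (fun d => PySem.Int.mod total d == 0)).find?
            (fun d => fillB d (PySem.Int.floordiv total d - 1) d 0 [] s)).getD 0 := by
  intro fuel
  induction fuel with
  | zero =>
    intro c hc
    rw [PySem.List.pyRange_one_eq_nil (by omega)]
    rfl
  | succ f ih =>
    intro c hc
    rw [PySem.List.pyRange_one_cons (by omega), outerA]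
    by_cases hm : PySem.Int.mod total c = 0
    · rw [if_neg (by simpa using hm)]
      have hmain := keep_main s c (PySem.Int.floordiv total c) 1 0 0
        (List.replicate s.length false) (by simp) (by simp)
      simp only [List.take_zero, List.drop_zero, sub_zero, keep,
        List.reverse_nil] at hmain
      rw [keep_replicate] at hmain
      rw [hmain]
      rw [List.filter_cons_of_pos (by simpa using hm)]
      rw [List.find?_cons]
      by_cases hq : fillB c (PySem.Int.floordiv total c - 1) c 0 [] s = true
      · rw [hq]
        rfl
      · simp only [Bool.not_eq_true] at hq
        rw [hq, if_neg Bool.false_ne_true]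
        exact ih (c + 1) (by omega)
    · rw [if_pos (by simpa using hm)]
      rw [List.filter_cons_of_neg (by simpa using hm)]
      exact ih (c + 1) (by omega)

-- ===== VERDICT (by name: the statement is the Claim_ definition above) =====
theorem minStickLength_spec : Claim_equal_minStickLength := by
  intro sticks _ _
  unfold Spec_minStickLength minStickLength minStickLength_alt
  cases PySem.List.max? sticks (fun x => x) with
  | none => rfl
  | some maxLen =>
    simp only
    rw [outer_eq _ _ _ _ rfl]
    cases h : List.find? _ _ <;> rfl
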